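-- pv_equiv track=rewrite | github.com/filipecn/maldives | utils.py | regionalLocals
-- ===== SOURCE A (Python) =====
-- def minIndex(v, f, l):
--     minI = f
--     for i in range(f,l+1):
--         if v[minI] > v[i]:
--             minI = i
--     return minI
--
-- def maxIndex(v, f, l):
--     maxI = f
--     for i in range(f,l+1):
--         if v[maxI] < v[i]:
--             maxI = i
--     return maxI
--
-- def regionalLocals(prices, windowRadius = 15):
--     maxima = []
--     minima = []
--     for i in range(windowRadius, len(prices) - windowRadius):
--         if maxIndex(prices, i - windowRadius, i + windowRadius) == i:
--             maxima.append(i)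
--         elif minIndex(prices, i - windowRadius, i + windowRadius) == i:
--             minima.append(i)
--     return maxima, minima
-- ===== SOURCE B (Python) =====
-- def regionalLocals(prices, windowRadius = 15):
--     n = len(prices)
--     r = windowRadius
--     if r < 0:
--         return [], []
--     if r == 0:
--         return list(range(n)), []
--     if n <= 2 * r:
--         return [], []  # no position has a full window on both sides
--     # Sliding-window extrema: split the array into blocks of size r and keep
--     # running extrema within each block from the left (pre) and from the right (suf);
--     # the extreme of any length-r window [a, a+r-1] is op(suf[a], pre[a+r-1]).
--     def window_ext(op):
--         pre = [0] * n
--         suf = [0] * n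
--         for j in range(n):
--             pre[j] = prices[j] if j % r == 0 else op(pre[j - 1], prices[j])
--         for j in range(n - 1, -1, -1):
--             suf[j] = prices[j] if (j % r == r - 1 or j == n - 1) else op(suf[j + 1], prices[j])
--         return lambda a: op(suf[a], pre[a + r - 1])
--     wmax = window_ext(max)
--     wmin = window_ext(min)
--     maxima = []
--     minima = []
--     for i in range(r, n - r):
--         v = prices[i]
--         if v > wmax(i - r) and v >= wmax(i + 1):
--             maxima.append(i)
--         elif v < wmin(i - r) and v <= wmin(i + 1):
--             minima.append(i)
--     return maxima, minima
-- ===== Notes on version B (the rewrite author's own statement) =====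
-- stated objective: alternative
-- what changed: Replaced the per-position rescans of the whole window (maxIndex/minIndex over 2r+1 elements for every i) by a block-decomposition sliding-window extremum (per-block prefix/suffix max and min arrays, window extreme = op(suf[a], pre[a+r-1])) and a direct strict-left/weak-right comparison at each position.
import Mathlib
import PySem

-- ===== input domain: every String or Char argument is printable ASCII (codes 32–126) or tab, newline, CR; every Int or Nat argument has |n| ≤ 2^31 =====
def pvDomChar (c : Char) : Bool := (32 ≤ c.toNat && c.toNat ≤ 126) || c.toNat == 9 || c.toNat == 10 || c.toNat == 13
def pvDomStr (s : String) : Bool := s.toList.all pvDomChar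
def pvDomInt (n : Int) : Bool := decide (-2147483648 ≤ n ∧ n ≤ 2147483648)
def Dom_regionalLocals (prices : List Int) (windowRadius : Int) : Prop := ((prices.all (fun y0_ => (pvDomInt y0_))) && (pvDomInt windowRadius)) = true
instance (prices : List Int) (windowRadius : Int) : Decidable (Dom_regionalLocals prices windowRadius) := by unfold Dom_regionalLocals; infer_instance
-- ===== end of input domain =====

-- B replaces A's per-position window rescans by a block-decomposition
-- sliding-window extremum (per-block prefix/suffix max/min), proved to return the same pair of index lists.


-- ===== PORT A =====
def pyMaxIndex (v : List Int) (f l : Int) : Int :=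
  (PySem.List.pyRange f (l + 1) 1).foldl
    (fun maxI i => if PySem.List.pyGetD v maxI 0 < PySem.List.pyGetD v i 0 then i else maxI) f

def pyMinIndex (v : List Int) (f l : Int) : Int :=
  (PySem.List.pyRange f (l + 1) 1).foldl
    (fun minI i => if PySem.List.pyGetD v minI 0 > PySem.List.pyGetD v i 0 then i else minI) f

def regionalLocals (prices : List Int) (windowRadius : Int) : List Int × List Int :=
  (PySem.List.pyRange windowRadius (PySem.List.len prices - windowRadius) 1).foldl
    (fun (st : List Int × List Int) i =>
      if pyMaxIndex prices (i - windowRadius) (i + windowRadius) = i then (st.1 ++ [i], st.2)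
      else if pyMinIndex prices (i - windowRadius) (i + windowRadius) = i then (st.1, st.2 ++ [i])
      else st) ([], [])

-- ===== PORT B =====
-- pre[j] of Source B: running extremum restarted at each block boundary (j % r == 0)
def bPre (g : Nat → Int) (r : Nat) (op : Int → Int → Int) : Nat → Int
  | 0 => g 0
  | j + 1 => if (j + 1) % r = 0 then g (j + 1) else op (bPre g r op j) (g (j + 1))

-- suf[j] of Source B, indexed by distance k = (n-1) - j from the right end
def bSufAux (g : Nat → Int) (r n : Nat) (op : Int → Int → Int) : Nat → Int
  | 0 => g (n - 1)
  | k + 1 =>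
      if (n - 1 - (k + 1)) % r = r - 1 then g (n - 1 - (k + 1))
      else op (bSufAux g r n op k) (g (n - 1 - (k + 1)))

def bSuf (g : Nat → Int) (r n : Nat) (op : Int → Int → Int) (j : Nat) : Int :=
  bSufAux g r n op (n - 1 - j)

def regionalLocals_alt (prices : List Int) (windowRadius : Int) : List Int × List Int :=
  let n := prices.length
  if windowRadius < 0 then ([], [])
  else if windowRadius = 0 then ((List.range n).map (fun i : Nat => (i : Int)), [])
  else if n ≤ 2 * windowRadius.toNat then ([], [])
  else
    let r := windowRadius.toNat
    let g : Nat → Int := fun j => prices.getD j 0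
    let wmax : Nat → Int := fun a => max (bSuf g r n max a) (bPre g r max (a + r - 1))
    let wmin : Nat → Int := fun a => min (bSuf g r n min a) (bPre g r min (a + r - 1))
    (List.range' r (n - 2 * r)).foldl
      (fun (st : List Int × List Int) i =>
        if g i > wmax (i - r) ∧ g i ≥ wmax (i + 1) then (st.1 ++ [(i : Int)], st.2)
        else if g i < wmin (i - r) ∧ g i ≤ wmin (i + 1) then (st.1, st.2 ++ [(i : Int)])
        else st) ([], [])

-- ===== PRECONDITION & SPEC =====
def Spec_regionalLocals (prices : List Int) (windowRadius : Int) (out : List Int × List Int) : Prop := out = regionalLocals_alt prices windowRadius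
instance (prices : List Int) (windowRadius : Int) (out : List Int × List Int) : Decidable (Spec_regionalLocals prices windowRadius out) := by unfold Spec_regionalLocals; infer_instance

-- ===== CLAIM (what is proved, stated in full; the proofs are below) =====
def Claim_equal_regionalLocals : Prop := ∀ (prices : List Int) (windowRadius : Int), Dom_regionalLocals prices windowRadius → Spec_regionalLocals prices windowRadius (regionalLocals prices windowRadius)

-- ===== LEMMAS AND PROOFS =====

-- fold of op over the window v[f .. f+k] (proof-side characterisation of B's arrays)
def W (g : Nat → Int) (op : Int → Int → Int) (f : Nat) : Nat → Int
  | 0 => g f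
  | k + 1 => op (W g op f k) (g (f + k + 1))

-- first argmax index of h over [f, f+k] (proof-side characterisation of A's scans)
def fam (h : Nat → Int) (f : Nat) : Nat → Nat
  | 0 => f
  | k + 1 => if h (fam h f k) < h (f + k + 1) then f + k + 1 else fam h f k

theorem W_split (g : Nat → Int) (op : Int → Int → Int)
    (hassoc : ∀ a b c, op (op a b) c = op a (op b c)) (f k : Nat) :
    ∀ m, W g op f (k + m + 1) = op (W g op f k) (W g op (f + k + 1) m) := by
  intro m
  induction m with
  | zero => simp [W]
  | succ m ih =>
      have e1 : k + (m + 1) + 1 = (k + m + 1) + 1 := by omega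
      rw [e1]
      show op (W g op f (k + m + 1)) (g (f + (k + m + 1) + 1)) = _
      rw [ih, hassoc]
      have e2 : f + (k + m + 1) + 1 = (f + k + 1) + m + 1 := by omega
      rw [e2]
      rfl

theorem W_head (g : Nat → Int) (op : Int → Int → Int)
    (hassoc : ∀ a b c, op (op a b) c = op a (op b c)) (f k : Nat) :
    W g op f (k + 1) = op (g f) (W g op (f + 1) k) := by
  have := W_split g op hassoc f 0 k
  simpa [W] using this

theorem W_max_ge (g : Nat → Int) (f : Nat) :
    ∀ k m, f ≤ m → m ≤ f + k → g m ≤ W g max f k := by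
  intro k
  induction k with
  | zero => intro m h1 h2; have : m = f := by omega
            subst this; simp [W]
  | succ k ih =>
      intro m h1 h2
      show g m ≤ max (W g max f k) (g (f + k + 1))
      rcases Nat.lt_or_ge m (f + k + 1) with h | h
      · exact le_trans (ih m h1 (by omega)) (le_max_left _ _)
      · have : m = f + k + 1 := by omega
        subst this; exact le_max_right _ _

theorem W_max_lt_iff (g : Nat → Int) (f : Nat) :
    ∀ k c, W g max f k < c ↔ ∀ m, f ≤ m → m ≤ f + k → g m < c := by
  intro k
  induction k with
  | zero => intro c; constructor
            · intro h m h1 h2; have : m = f := by omega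
              subst this; simpa [W] using h
            · intro h; simpa [W] using h f le_rfl (by omega)
  | succ k ih =>
      intro c
      show max (W g max f k) (g (f + k + 1)) < c ↔ _
      rw [max_lt_iff, ih]
      constructor
      · rintro ⟨h1, h2⟩ m hm1 hm2
        rcases Nat.lt_or_ge m (f + k + 1) with h | h
        · exact h1 m hm1 (by omega)
        · have : m = f + k + 1 := by omega
          subst this; exact h2
      · intro h
        exact ⟨fun m hm1 hm2 => h m hm1 (by omega), h _ (by omega) (by omega)⟩

theorem W_max_le_iff (g : Nat → Int) (f : Nat) :
    ∀ k c, W g max f k ≤ c ↔ ∀ m, f ≤ m → m ≤ f + k → g m ≤ c := by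
  intro k
  induction k with
  | zero => intro c; constructor
            · intro h m h1 h2; have : m = f := by omega
              subst this; simpa [W] using h
            · intro h; simpa [W] using h f le_rfl (by omega)
  | succ k ih =>
      intro c
      show max (W g max f k) (g (f + k + 1)) ≤ c ↔ _
      rw [max_le_iff, ih]
      constructor
      · rintro ⟨h1, h2⟩ m hm1 hm2
        rcases Nat.lt_or_ge m (f + k + 1) with h | h
        · exact h1 m hm1 (by omega)
        · have : m = f + k + 1 := by omega
          subst this; exact h2
      · intro h
        exact ⟨fun m hm1 hm2 => h m hm1 (by omega), h _ (by omega) (by omega)⟩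

theorem W_min_gt_iff (g : Nat → Int) (f : Nat) :
    ∀ k c, c < W g min f k ↔ ∀ m, f ≤ m → m ≤ f + k → c < g m := by
  intro k
  induction k with
  | zero => intro c; constructor
            · intro h m h1 h2; have : m = f := by omega
              subst this; simpa [W] using h
            · intro h; simpa [W] using h f le_rfl (by omega)
  | succ k ih =>
      intro c
      show c < min (W g min f k) (g (f + k + 1)) ↔ _
      rw [lt_min_iff, ih]
      constructor
      · rintro ⟨h1, h2⟩ m hm1 hm2
        rcases Nat.lt_or_ge m (f + k + 1) with h | h
        · exact h1 m hm1 (by omega)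
        · have : m = f + k + 1 := by omega
          subst this; exact h2
      · intro h
        exact ⟨fun m hm1 hm2 => h m hm1 (by omega), h _ (by omega) (by omega)⟩

theorem W_min_le_iff (g : Nat → Int) (f : Nat) :
    ∀ k c, c ≤ W g min f k ↔ ∀ m, f ≤ m → m ≤ f + k → c ≤ g m := by
  intro k
  induction k with
  | zero => intro c; constructor
            · intro h m h1 h2; have : m = f := by omega
              subst this; simpa [W] using h
            · intro h; simpa [W] using h f le_rfl (by omega)
  | succ k ih =>
      intro c
      show c ≤ min (W g min f k) (g (f + k + 1)) ↔ _
      rw [le_min_iff, ih]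
      constructor
      · rintro ⟨h1, h2⟩ m hm1 hm2
        rcases Nat.lt_or_ge m (f + k + 1) with h | h
        · exact h1 m hm1 (by omega)
        · have : m = f + k + 1 := by omega
          subst this; exact h2
      · intro h
        exact ⟨fun m hm1 hm2 => h m hm1 (by omega), h _ (by omega) (by omega)⟩

theorem fam_le (h : Nat → Int) (f : Nat) : ∀ k, f ≤ fam h f k ∧ fam h f k ≤ f + k := by
  intro k
  induction k with
  | zero => simp [fam]
  | succ k ih =>
      simp only [fam]
      split <;> omega

theorem fam_val (h : Nat → Int) (f : Nat) : ∀ k, h (fam h f k) = W h max f k := by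
  intro k
  induction k with
  | zero => simp [fam, W]
  | succ k ih =>
      show h (if h (fam h f k) < h (f + k + 1) then f + k + 1 else fam h f k) =
        max (W h max f k) (h (f + k + 1))
      split
      · rename_i hlt
        rw [← ih]; exact (max_eq_right (le_of_lt hlt)).symm
      · rename_i hlt
        rw [← ih]; exact (max_eq_left (not_lt.mp hlt)).symm

theorem fam_first (h : Nat → Int) (f : Nat) :
    ∀ k m, f ≤ m → m < fam h f k → h m < h (fam h f k) := by
  intro k
  induction k with
  | zero => intro m h1 h2; simp [fam] at h2; omega
  | succ k ih =>
      intro m h1 h2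
      revert h2
      show m < (if h (fam h f k) < h (f + k + 1) then f + k + 1 else fam h f k) → h m <
        h (if h (fam h f k) < h (f + k + 1) then f + k + 1 else fam h f k)
      split
      · rename_i hlt
        intro hm
        rcases Nat.lt_or_ge m (fam h f k) with hc | hc
        · exact lt_trans (ih m h1 hc) hlt
        · have hle : h m ≤ W h max f k := W_max_ge h f k m h1 (by omega)
          rw [← fam_val h f k] at hle
          exact lt_of_le_of_lt hle hlt
      · intro hm; exact ih m h1 hm

theorem fam_eq_iff (h : Nat → Int) (f k i : Nat) (hfi : f ≤ i) (hik : i ≤ f + k) :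
    fam h f k = i ↔
      (∀ m, f ≤ m → m < i → h m < h i) ∧ (∀ m, i < m → m ≤ f + k → h m ≤ h i) := by
  constructor
  · intro he
    subst he
    refine ⟨fun m h1 h2 => fam_first h f k m h1 h2, fun m h1 h2 => ?_⟩
    have := W_max_ge h f k m (by omega) h2
    rwa [← fam_val h f k] at this
  · rintro ⟨h1, h2⟩
    rcases lt_trichotomy (fam h f k) i with hc | hc | hc
    · exfalso
      have hfl := fam_le h f k
      have ha := h1 (fam h f k) hfl.1 hc
      have hb : h i ≤ W h max f k := W_max_ge h f k i hfi hik
      rw [← fam_val h f k] at hb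
      exact absurd (lt_of_le_of_lt hb ha) (lt_irrefl _)
    · exact hc
    · exfalso
      have hfl := fam_le h f k
      have ha := h2 (fam h f k) hc hfl.2
      have hb := fam_first h f k i hfi hc
      exact absurd (lt_of_le_of_lt ha hb) (lt_irrefl _)

theorem pyMaxIndex_eq_fam (v : List Int) (f : Nat) :
    ∀ (k : Nat), pyMaxIndex v (f : Int) ((f : Int) + (k : Int)) =
      ((fam (fun j => v.getD j 0) f k : Nat) : Int) := by
  intro k
  induction k with
  | zero =>
      have e : (f : Int) + (0 : Nat) + 1 = (f : Int) + 1 := by push_cast; ring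
      rw [pyMaxIndex, e, PySem.List.pyRange_one_singleton]
      simp [fam]
  | succ k ih =>
      have e : (f : Int) + ((k + 1 : Nat) : Int) + 1 = ((f : Int) + (k : Nat) + 1) + 1 := by
        push_cast; ring
      rw [pyMaxIndex, e, PySem.List.pyRange_one_succ_right (by omega)]
      rw [List.foldl_append]
      rw [pyMaxIndex] at ih
      rw [ih]
      have e2 : (f : Int) + (k : Nat) + 1 = ((f + k + 1 : Nat) : Int) := by push_cast; ring
      rw [List.foldl]
      simp only [List.foldl, e2, PySem.List.pyGetD_natCast]
      show (if (v.getD (fam (fun j => v.getD j 0) f k) 0) < v.getD (f + k + 1) 0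
        then ((f + k + 1 : Nat) : Int) else _) = _
      simp only [fam]
      split <;> simp

theorem pyMinIndex_eq_fam (v : List Int) (f : Nat) :
    ∀ (k : Nat), pyMinIndex v (f : Int) ((f : Int) + (k : Int)) =
      ((fam (fun j => -(v.getD j 0)) f k : Nat) : Int) := by
  intro k
  induction k with
  | zero =>
      have e : (f : Int) + (0 : Nat) + 1 = (f : Int) + 1 := by push_cast; ring
      rw [pyMinIndex, e, PySem.List.pyRange_one_singleton]
      simp [fam]
  | succ k ih =>
      have e : (f : Int) + ((k + 1 : Nat) : Int) + 1 = ((f : Int) + (k : Nat) + 1) + 1 := by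
        push_cast; ring
      rw [pyMinIndex, e, PySem.List.pyRange_one_succ_right (by omega)]
      rw [List.foldl_append]
      rw [pyMinIndex] at ih
      rw [ih]
      have e2 : (f : Int) + (k : Nat) + 1 = ((f + k + 1 : Nat) : Int) := by push_cast; ring
      rw [List.foldl]
      simp only [List.foldl, e2, PySem.List.pyGetD_natCast]
      show (if (v.getD (fam (fun j => -(v.getD j 0)) f k) 0) > v.getD (f + k + 1) 0
        then ((f + k + 1 : Nat) : Int) else _) = _
      simp only [fam]
      by_cases hc : v.getD (f + k + 1) 0 < v.getD (fam (fun j => -(v.getD j 0)) f k) 0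
      · rw [if_pos hc,
          if_pos (show (-(v.getD (fam (fun j => -(v.getD j 0)) f k) 0) : Int) <
            -(v.getD (f + k + 1) 0) from neg_lt_neg_iff.mpr hc)]
      · rw [if_neg hc,
          if_neg (show ¬ (-(v.getD (fam (fun j => -(v.getD j 0)) f k) 0) : Int) <
            -(v.getD (f + k + 1) 0) from fun hx => hc (neg_lt_neg_iff.mp hx))]

theorem succ_mod_of_ne (r j : Nat) (hr : 0 < r) (h : j % r ≠ r - 1) :
    (j + 1) % r = j % r + 1 ∧ (j + 1) / r = j / r := by
  have hlt : j % r < r := Nat.mod_lt _ hr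
  have hlt2 : j % r + 1 < r := by omega
  constructor
  · conv_lhs => rw [show j + 1 = (j % r + 1) + r * (j / r) by
      have := Nat.mod_add_div j r; omega]
    rw [Nat.add_mul_mod_self_left, Nat.mod_eq_of_lt hlt2]
  · conv_lhs => rw [show j + 1 = (j % r + 1) + r * (j / r) by
      have := Nat.mod_add_div j r; omega]
    rw [Nat.add_mul_div_left _ _ hr, Nat.div_eq_of_lt hlt2, Nat.zero_add]

theorem succ_mod_of_eq (r j : Nat) (hr : 0 < r) (h : j % r = r - 1) :
    (j + 1) % r = 0 := by
  conv_lhs => rw [show j + 1 = (j % r + 1) + r * (j / r) by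
    have := Nat.mod_add_div j r; omega]
  rw [Nat.add_mul_mod_self_left, h, Nat.sub_add_cancel hr, Nat.mod_self]

theorem bPre_eq (g : Nat → Int) (r : Nat) (op : Int → Int → Int) (hr : 0 < r) :
    ∀ j, bPre g r op j = W g op (r * (j / r)) (j % r) := by
  intro j
  induction j with
  | zero => simp [bPre, W]
  | succ j ih =>
      show (if (j + 1) % r = 0 then g (j + 1) else op (bPre g r op j) (g (j + 1))) = _
      by_cases h0 : (j + 1) % r = 0
      · rw [if_pos h0, h0]
        have : r * ((j + 1) / r) = j + 1 := Nat.mul_div_cancel' (Nat.dvd_of_mod_eq_zero h0)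
        rw [this]; rfl
      · rw [if_neg h0]
        have hne : j % r ≠ r - 1 := by
          intro hc; exact h0 (succ_mod_of_eq r j hr hc)
        obtain ⟨hm, hd⟩ := succ_mod_of_ne r j hr hne
        rw [hm, hd, ih]
        show _ = op (W g op (r * (j / r)) (j % r)) (g (r * (j / r) + j % r + 1))
        have : r * (j / r) + j % r = j := by
          have := Nat.div_add_mod j r; omega
        rw [this]

theorem bSufAux_eq (g : Nat → Int) (r n : Nat) (op : Int → Int → Int)
    (hassoc : ∀ a b c, op (op a b) c = op a (op b c))
    (hcomm : ∀ a b, op a b = op b a) (hr : 0 < r) (hn : 0 < n) :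
    ∀ k j, j + k = n - 1 →
      bSufAux g r n op k = W g op j (min (n - 1) (r * (j / r) + (r - 1)) - j) := by
  intro k
  induction k with
  | zero =>
      intro j hj
      have hub : j ≤ r * (j / r) + (r - 1) := by
        have h1 := Nat.div_add_mod j r
        have h2 : j % r < r := Nat.mod_lt _ hr
        omega
      have he : min (n - 1) (r * (j / r) + (r - 1)) - j = 0 := by omega
      rw [he]
      show g (n - 1) = g j
      rw [show n - 1 = j from by omega]
  | succ k ih =>
      intro j hj
      have hjlt : j < n - 1 := by omega
      have hje : n - 1 - (k + 1) = j := by omega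
      show (if (n - 1 - (k + 1)) % r = r - 1 then g (n - 1 - (k + 1))
        else op (bSufAux g r n op k) (g (n - 1 - (k + 1)))) = _
      rw [hje]
      by_cases hb : j % r = r - 1
      · rw [if_pos hb]
        have hbe : r * (j / r) + (r - 1) = j := by
          have := Nat.div_add_mod j r; omega
        rw [hbe, min_eq_right (by omega), Nat.sub_self]
        rfl
      · rw [if_neg hb]
        have hdiv : (j + 1) / r = j / r := (succ_mod_of_ne r j hr hb).2
        have ihj := ih (j + 1) (by omega)
        rw [hdiv] at ihj
        rw [ihj]
        set e := min (n - 1) (r * (j / r) + (r - 1)) with he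
        have hge : j + 1 ≤ e := by
          have h1 := Nat.div_add_mod j r
          have h2 : j % r < r := Nat.mod_lt _ hr
          have : j + 1 ≤ r * (j / r) + (r - 1) := by omega
          omega
        have e1 : e - j = (e - (j + 1)) + 1 := by omega
        rw [e1, W_head g op hassoc j (e - (j + 1)), hcomm]

theorem bSuf_eq (g : Nat → Int) (r n : Nat) (op : Int → Int → Int)
    (hassoc : ∀ a b c, op (op a b) c = op a (op b c))
    (hcomm : ∀ a b, op a b = op b a) (hr : 0 < r) (hn : 0 < n) (j : Nat) (hj : j ≤ n - 1) :
    bSuf g r n op j = W g op j (min (n - 1) (r * (j / r) + (r - 1)) - j) := by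
  exact bSufAux_eq g r n op hassoc hcomm hr hn (n - 1 - j) j (by omega)

theorem window_eq (g : Nat → Int) (r n : Nat) (op : Int → Int → Int)
    (hassoc : ∀ a b c, op (op a b) c = op a (op b c))
    (hcomm : ∀ a b, op a b = op b a) (hidem : ∀ a, op a a = a)
    (hr : 0 < r) (a : Nat) (h : a + r ≤ n) :
    op (bSuf g r n op a) (bPre g r op (a + r - 1)) = W g op a (r - 1) := by
  have hn : 0 < n := by omega
  set q := a / r with hq
  set s := a % r with hs
  have hdm : r * q + s = a := Nat.div_add_mod a r
  have hslt : s < r := Nat.mod_lt _ hr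
  have hb : a + r - 1 ≤ n - 1 := by omega
  rw [bSuf_eq g r n op hassoc hcomm hr hn a (by omega), bPre_eq g r op hr]
  by_cases hs0 : s = 0
  · -- block-aligned window: both halves are the whole window
    have ha : a = r * q := by omega
    have hbe : a + r - 1 = r * q + (r - 1) := by omega
    have hdiv : (a + r - 1) / r = q := by
      rw [hbe, Nat.mul_add_div hr, Nat.div_eq_of_lt (by omega), Nat.add_zero]
    have hmod : (a + r - 1) % r = r - 1 := by
      rw [hbe, Nat.mul_add_mod, Nat.mod_eq_of_lt (by omega)]
    rw [hdiv, hmod, ← ha]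
    have he : min (n - 1) (a + (r - 1)) - a = r - 1 := by omega
    rw [he]
    exact hidem _
  · -- window straddles a block boundary; glue the two halves with W_split
    have hs1 : 1 ≤ s := by omega
    have hbe : a + r - 1 = r * (q + 1) + (s - 1) := by
      have : r * (q + 1) = r * q + r := by ring
      omega
    have hdiv : (a + r - 1) / r = q + 1 := by
      rw [hbe, Nat.mul_add_div hr, Nat.div_eq_of_lt (by omega), Nat.add_zero]
    have hmod : (a + r - 1) % r = s - 1 := by
      rw [hbe, Nat.mul_add_mod, Nat.mod_eq_of_lt (by omega)]
    rw [hdiv, hmod]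
    have hbs : r * (q + 1) = a + (r - 1 - s) + 1 := by
      have : r * (q + 1) = r * q + r := by ring
      omega
    have he : min (n - 1) (r * q + (r - 1)) - a = r - 1 - s := by
      have h3 : r * q + (r - 1) = a + (r - 1 - s) := by omega
      omega
    rw [he, hbs]
    have := W_split g op hassoc a (r - 1 - s) (s - 1)
    have e1 : (r - 1 - s) + (s - 1) + 1 = r - 1 := by omega
    rw [e1] at this
    exact this.symm

theorem pred_max_iff (v : List Int) (r i : Nat) (hr : 0 < r) (h1 : r ≤ i)
    (h2 : i + r < v.length) :
    (pyMaxIndex v ((i : Int) - (r : Int)) ((i : Int) + (r : Int)) = (i : Int)) ↔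
      (v.getD i 0 > max (bSuf (fun j => v.getD j 0) r v.length max (i - r))
          (bPre (fun j => v.getD j 0) r max (i - r + r - 1)) ∧
       v.getD i 0 ≥ max (bSuf (fun j => v.getD j 0) r v.length max (i + 1))
          (bPre (fun j => v.getD j 0) r max (i + 1 + r - 1))) := by
  have e1 : (i : Int) - (r : Int) = ((i - r : Nat) : Int) := by push_cast [Nat.cast_sub h1]; ring
  have e2 : (i : Int) + (r : Int) = ((i - r : Nat) : Int) + ((2 * r : Nat) : Int) := by
    push_cast [Nat.cast_sub h1]; ring
  rw [e1, e2, pyMaxIndex_eq_fam v (i - r) (2 * r), Nat.cast_inj]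
  rw [fam_eq_iff (fun j => v.getD j 0) (i - r) (2 * r) i (by omega) (by omega)]
  rw [window_eq (fun j => v.getD j 0) r v.length max max_assoc max_comm max_self hr (i - r)
    (by omega)]
  rw [window_eq (fun j => v.getD j 0) r v.length max max_assoc max_comm max_self hr (i + 1)
    (by omega)]
  constructor
  · rintro ⟨ha, hb⟩
    refine ⟨(W_max_lt_iff _ _ _ _).mpr ?_, (W_max_le_iff _ _ _ _).mpr ?_⟩
    · intro m hm1 hm2; exact ha m hm1 (by omega)
    · intro m hm1 hm2; exact hb m (by omega) (by omega)
  · rintro ⟨ha, hb⟩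
    have ha' := (W_max_lt_iff (fun j => v.getD j 0) (i - r) (r - 1) (v.getD i 0)).mp ha
    have hb' := (W_max_le_iff (fun j => v.getD j 0) (i + 1) (r - 1) (v.getD i 0)).mp hb
    exact ⟨fun m hm1 hm2 => ha' m hm1 (by omega), fun m hm1 hm2 => hb' m (by omega) (by omega)⟩

theorem pred_min_iff (v : List Int) (r i : Nat) (hr : 0 < r) (h1 : r ≤ i)
    (h2 : i + r < v.length) :
    (pyMinIndex v ((i : Int) - (r : Int)) ((i : Int) + (r : Int)) = (i : Int)) ↔
      (v.getD i 0 < min (bSuf (fun j => v.getD j 0) r v.length min (i - r))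
          (bPre (fun j => v.getD j 0) r min (i - r + r - 1)) ∧
       v.getD i 0 ≤ min (bSuf (fun j => v.getD j 0) r v.length min (i + 1))
          (bPre (fun j => v.getD j 0) r min (i + 1 + r - 1))) := by
  have e1 : (i : Int) - (r : Int) = ((i - r : Nat) : Int) := by push_cast [Nat.cast_sub h1]; ring
  have e2 : (i : Int) + (r : Int) = ((i - r : Nat) : Int) + ((2 * r : Nat) : Int) := by
    push_cast [Nat.cast_sub h1]; ring
  rw [e1, e2, pyMinIndex_eq_fam v (i - r) (2 * r), Nat.cast_inj]
  rw [fam_eq_iff (fun j => -(v.getD j 0)) (i - r) (2 * r) i (by omega) (by omega)]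
  rw [window_eq (fun j => v.getD j 0) r v.length min min_assoc min_comm min_self hr (i - r)
    (by omega)]
  rw [window_eq (fun j => v.getD j 0) r v.length min min_assoc min_comm min_self hr (i + 1)
    (by omega)]
  constructor
  · rintro ⟨ha, hb⟩
    refine ⟨(W_min_gt_iff _ _ _ _).mpr ?_, (W_min_le_iff _ _ _ _).mpr ?_⟩
    · intro m hm1 hm2
      exact neg_lt_neg_iff.mp (ha m hm1 (by omega))
    · intro m hm1 hm2
      exact neg_le_neg_iff.mp (hb m (by omega) (by omega))
  · rintro ⟨ha, hb⟩
    have ha' := (W_min_gt_iff (fun j => v.getD j 0) (i - r) (r - 1) (v.getD i 0)).mp ha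
    have hb' := (W_min_le_iff (fun j => v.getD j 0) (i + 1) (r - 1) (v.getD i 0)).mp hb
    exact ⟨fun m hm1 hm2 => neg_lt_neg_iff.mpr (ha' m hm1 (by omega)),
      fun m hm1 hm2 => neg_le_neg_iff.mpr (hb' m (by omega) (by omega))⟩

theorem loop_eq (v : List Int) (r : Nat) (hr : 0 < r) :
    ∀ (cnt start : Nat) (st : List Int × List Int), r ≤ start → start + cnt + r ≤ v.length →
      (PySem.List.pyRange (start : Int) ((start : Int) + (cnt : Int)) 1).foldl
        (fun (st : List Int × List Int) i =>
          if pyMaxIndex v (i - (r : Int)) (i + (r : Int)) = i then (st.1 ++ [i], st.2)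
          else if pyMinIndex v (i - (r : Int)) (i + (r : Int)) = i then (st.1, st.2 ++ [i])
          else st) st =
      (List.range' start cnt).foldl
        (fun (st : List Int × List Int) i =>
          if v.getD i 0 > max (bSuf (fun j => v.getD j 0) r v.length max (i - r))
                (bPre (fun j => v.getD j 0) r max (i - r + r - 1)) ∧
             v.getD i 0 ≥ max (bSuf (fun j => v.getD j 0) r v.length max (i + 1))
                (bPre (fun j => v.getD j 0) r max (i + 1 + r - 1)) then (st.1 ++ [(i : Int)], st.2)
          else if v.getD i 0 < min (bSuf (fun j => v.getD j 0) r v.length min (i - r))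
                (bPre (fun j => v.getD j 0) r min (i - r + r - 1)) ∧
             v.getD i 0 ≤ min (bSuf (fun j => v.getD j 0) r v.length min (i + 1))
                (bPre (fun j => v.getD j 0) r min (i + 1 + r - 1)) then (st.1, st.2 ++ [(i : Int)])
          else st) st := by
  intro cnt
  induction cnt with
  | zero =>
      intro start st h1 h2
      rw [show ((start : Int) + ((0 : Nat) : Int)) = (start : Int) by push_cast; ring]
      rw [PySem.List.pyRange_one_eq_nil le_rfl]
      rfl
  | succ cnt ih =>
      intro start st h1 h2
      rw [PySem.List.pyRange_one_cons (by push_cast; omega)]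
      rw [show ((start : Int) + 1) = ((start + 1 : Nat) : Int) by push_cast; ring]
      rw [show ((start : Int) + ((cnt + 1 : Nat) : Int)) = ((start + 1 : Nat) : Int) + ((cnt : Nat) : Int) by push_cast; ring]
      rw [List.range'_succ]
      rw [List.foldl_cons, List.foldl_cons]
      have hmx := pred_max_iff v r start hr h1 (by omega)
      have hmn := pred_min_iff v r start hr h1 (by omega)
      have step_eq :
          (if pyMaxIndex v ((start : Int) - (r : Int)) ((start : Int) + (r : Int)) = (start : Int)
            then (st.1 ++ [(start : Int)], st.2)
           else if pyMinIndex v ((start : Int) - (r : Int)) ((start : Int) + (r : Int)) = (start : Int)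
            then (st.1, st.2 ++ [(start : Int)])
           else st) =
          (if v.getD start 0 > max (bSuf (fun j => v.getD j 0) r v.length max (start - r))
                (bPre (fun j => v.getD j 0) r max (start - r + r - 1)) ∧
             v.getD start 0 ≥ max (bSuf (fun j => v.getD j 0) r v.length max (start + 1))
                (bPre (fun j => v.getD j 0) r max (start + 1 + r - 1)) then (st.1 ++ [(start : Int)], st.2)
           else if v.getD start 0 < min (bSuf (fun j => v.getD j 0) r v.length min (start - r))
                (bPre (fun j => v.getD j 0) r min (start - r + r - 1)) ∧
             v.getD start 0 ≤ min (bSuf (fun j => v.getD j 0) r v.length min (start + 1))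
                (bPre (fun j => v.getD j 0) r min (start + 1 + r - 1)) then (st.1, st.2 ++ [(start : Int)])
           else st) := by
        by_cases hA : pyMaxIndex v ((start : Int) - (r : Int)) ((start : Int) + (r : Int)) = (start : Int)
        · rw [if_pos hA, if_pos (hmx.mp hA)]
        · rw [if_neg hA, if_neg (fun hB => hA (hmx.mpr hB))]
          by_cases hA2 : pyMinIndex v ((start : Int) - (r : Int)) ((start : Int) + (r : Int)) = (start : Int)
          · rw [if_pos hA2, if_pos (hmn.mp hA2)]
          · rw [if_neg hA2, if_neg (fun hB => hA2 (hmn.mpr hB))]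
      rw [step_eq]
      exact ih (start + 1) _ (by omega) (by omega)

theorem pyMaxIndex_self (v : List Int) (i : Int) : pyMaxIndex v i i = i := by
  rw [pyMaxIndex, PySem.List.pyRange_one_singleton, List.foldl_cons, List.foldl_nil, ite_self]

theorem pyMaxIndex_empty (v : List Int) (f l : Int) (h : l + 1 ≤ f) : pyMaxIndex v f l = f := by
  rw [pyMaxIndex, PySem.List.pyRange_one_eq_nil h, List.foldl_nil]

theorem pyMinIndex_empty (v : List Int) (f l : Int) (h : l + 1 ≤ f) : pyMinIndex v f l = f := by
  rw [pyMinIndex, PySem.List.pyRange_one_eq_nil h, List.foldl_nil]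

theorem foldA_neg (v : List Int) (w : Int) (hw : w < 0) :
    ∀ (l : List Int) (st : List Int × List Int),
      l.foldl (fun (st : List Int × List Int) i =>
        if pyMaxIndex v (i - w) (i + w) = i then (st.1 ++ [i], st.2)
        else if pyMinIndex v (i - w) (i + w) = i then (st.1, st.2 ++ [i])
        else st) st = st := by
  intro l
  induction l with
  | nil => intro st; rfl
  | cons x l ih =>
      intro st
      rw [List.foldl_cons]
      rw [pyMaxIndex_empty v _ _ (by omega), pyMinIndex_empty v _ _ (by omega)]
      rw [if_neg (by omega), if_neg (by omega)]
      exact ih st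

theorem foldA_zero (v : List Int) :
    ∀ (l : List Int) (st : List Int × List Int),
      l.foldl (fun (st : List Int × List Int) i =>
        if pyMaxIndex v (i - 0) (i + 0) = i then (st.1 ++ [i], st.2)
        else if pyMinIndex v (i - 0) (i + 0) = i then (st.1, st.2 ++ [i])
        else st) st = (st.1 ++ l, st.2) := by
  intro l
  induction l with
  | nil => intro st; simp
  | cons x l ih =>
      intro st
      rw [List.foldl_cons]
      rw [show x - 0 = x by ring, show x + 0 = x by ring, pyMaxIndex_self]
      rw [if_pos rfl, ih]
      simp

-- ===== VERDICT (by name: the statement is the Claim_ definition above) =====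
theorem regionalLocals_spec : Claim_equal_regionalLocals := by
  unfold Claim_equal_regionalLocals
  intro prices wr _
  unfold Spec_regionalLocals
  rcases lt_trichotomy wr 0 with hw | hw | hw
  · -- negative radius: every inner range is empty, nothing is ever appended
    have hb : regionalLocals_alt prices wr = ([], []) := by
      rw [regionalLocals_alt]; simp only [if_pos hw]
    rw [hb, regionalLocals]
    exact foldA_neg prices wr hw _ _
  · -- zero radius: every index is appended to maxima
    subst hw
    have hb : regionalLocals_alt prices 0 =
        ((List.range prices.length).map (fun i : Nat => (i : Int)), []) := by
      simp [regionalLocals_alt]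
    rw [hb, regionalLocals]
    rw [foldA_zero prices _ ([], [])]
    simp only [List.nil_append, PySem.List.len_eq]
    rw [show ((prices.length : Int) - 0) = ((prices.length : Nat) : Int) by ring]
    rw [PySem.List.pyRange_zero_nat]
  · -- positive radius: the window-rescan loop and the block sliding-window agree pointwise
    have hr : 0 < wr.toNat := by omega
    have hwr : wr = (wr.toNat : Int) := (Int.toNat_of_nonneg (le_of_lt hw)).symm
    rw [regionalLocals, regionalLocals_alt]
    rw [if_neg (by omega), if_neg (by omega)]
    rw [hwr]
    simp only [Int.toNat_natCast, PySem.List.len_eq]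
    by_cases h2r : prices.length ≤ 2 * wr.toNat
    · rw [if_pos h2r, PySem.List.pyRange_one_eq_nil (by omega)]
      rfl
    · rw [if_neg h2r]
      rw [show ((prices.length : Int) - (wr.toNat : Int)) =
        ((wr.toNat : Nat) : Int) + ((prices.length - 2 * wr.toNat : Nat) : Int) by omega]
      exact loop_eq prices wr.toNat hr (prices.length - 2 * wr.toNat) wr.toNat ([], [])
        le_rfl (by omega)
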